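-- pv_equiv track=rewrite | github.com/juhokallio/AiMusic | composer/music.py | get_patterns
-- ===== SOURCE A (Python) =====
-- def get_patterns(notes, index, max_length=4):
--     patterns = set()
--     for pattern_length in range(min(max_length, index + 1)):
--         pitches = []
--         lengths = []
--         # TODO: missing as well
--         for i in range(max(0, index - pattern_length), index + 1):
--             pitch, length = notes[i]
--             pitches.append(pitch)
--             lengths.append("L" + length)
--         patterns.add(tuple(pitches))
--         patterns.add(tuple(lengths))
--     return patterns
-- ===== SOURCE B (Python) =====
-- def get_patterns(notes, index, max_length=4):
--     patterns = set()
--     pitches = []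
--     lengths = []
--     for step in range(min(max_length, index + 1)):
--         pitch, length = notes[index - step]
--         pitches.insert(0, pitch)
--         lengths.insert(0, "L" + length)
--         patterns.add(tuple(pitches))
--         patterns.add(tuple(lengths))
--     return patterns
-- ===== Notes on version B (the rewrite author's own statement) =====
-- stated objective: alternative
-- what changed: Replaces the nested re-slicing loops (each window rebuilt from scratch by an inner append loop) with a single accumulating pass that prepends one note per step to two running lists and snapshots them, so the inner rebuild loop disappears.
import Mathlib
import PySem

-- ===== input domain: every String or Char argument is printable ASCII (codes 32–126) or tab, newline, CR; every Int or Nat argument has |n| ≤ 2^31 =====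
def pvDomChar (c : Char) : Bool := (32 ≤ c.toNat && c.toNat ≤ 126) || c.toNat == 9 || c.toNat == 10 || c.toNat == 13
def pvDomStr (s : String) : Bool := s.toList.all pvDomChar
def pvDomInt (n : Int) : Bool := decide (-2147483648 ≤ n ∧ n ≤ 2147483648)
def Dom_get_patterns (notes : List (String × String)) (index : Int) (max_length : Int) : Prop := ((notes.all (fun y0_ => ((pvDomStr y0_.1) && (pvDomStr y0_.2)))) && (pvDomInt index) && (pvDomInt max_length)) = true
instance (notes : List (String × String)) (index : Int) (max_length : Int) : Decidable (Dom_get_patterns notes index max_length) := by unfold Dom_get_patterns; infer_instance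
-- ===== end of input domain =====

-- B builds each window incrementally by prepending to running lists (one pass),
-- instead of A's inner loop that rebuilds every window from scratch: alternative decomposition.


-- ===== PORT A =====
def get_patterns (notes : List (String × String)) (index : Int) (max_length : Int) : List (List String) :=
  (PySem.List.pyRange 0 (min max_length (index + 1)) 1).foldl
    (fun patterns pattern_length =>
      -- inner loop: rebuild pitches/lengths for this window by appending
      let pl := (PySem.List.pyRange (max 0 (index - pattern_length)) (index + 1) 1).foldl
        (fun (st : List String × List String) i =>
          let note := (PySem.List.pyGet? notes i).getD ("", "")   -- Pre_ guarantees in range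
          (st.1 ++ [note.1], st.2 ++ ["L" ++ note.2]))
        ([], [])
      PySem.Set.add (PySem.Set.add patterns pl.1) pl.2)
    PySem.Set.empty

-- ===== PORT B =====
def get_patterns_alt (notes : List (String × String)) (index : Int) (max_length : Int) : List (List String) :=
  ((PySem.List.pyRange 0 (min max_length (index + 1)) 1).foldl
    (fun (st : List (List String) × List String × List String) step =>
      let note := (PySem.List.pyGet? notes (index - step)).getD ("", "")   -- Pre_ guarantees in range
      let pitches := note.1 :: st.2.1          -- list.insert(0, x) = prepend
      let lengths := ("L" ++ note.2) :: st.2.2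
      (PySem.Set.add (PySem.Set.add st.1 pitches) lengths, pitches, lengths))
    (PySem.Set.empty, [], [])).1

-- ===== PRECONDITION & SPEC =====
-- Pre_ excludes exactly the inputs where Python A raises IndexError (index ≥ len(notes)
-- with at least one loop iteration); A returns normally everywhere else.
def Pre_get_patterns (notes : List (String × String)) (index : Int) (max_length : Int) : Prop :=
  max_length ≤ 0 ∨ index < (notes.length : Int)
instance (notes : List (String × String)) (index : Int) (max_length : Int) : Decidable (Pre_get_patterns notes index max_length) := by unfold Pre_get_patterns; infer_instance

def pvWitness_get_patterns : (List (String × String)) × Int × Int := ([("a", "1"), ("b", "2")], 1, 4)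

def Spec_get_patterns (notes : List (String × String)) (index : Int) (max_length : Int) (out : List (List String)) : Prop := out = get_patterns_alt notes index max_length
instance (notes : List (String × String)) (index : Int) (max_length : Int) (out : List (List String)) : Decidable (Spec_get_patterns notes index max_length out) := by unfold Spec_get_patterns; infer_instance

-- ===== CLAIM (what is proved, stated in full; the proofs are below) =====
def Claim_equal_get_patterns : Prop := ∀ (notes : List (String × String)) (index : Int) (max_length : Int), Dom_get_patterns notes index max_length → Pre_get_patterns notes index max_length → Spec_get_patterns notes index max_length (get_patterns notes index max_length)

-- ===== LEMMAS AND PROOFS =====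

-- pitch / "L"+length of the note at position i (proof abbreviations)
def pvP (notes : List (String × String)) (i : Int) : String :=
  ((PySem.List.pyGet? notes i).getD ("", "")).1
def pvL (notes : List (String × String)) (i : Int) : String :=
  "L" ++ ((PySem.List.pyGet? notes i).getD ("", "")).2

-- the window lists after k incremental steps: notes[index-k+1 .. index]
def pvWp (notes : List (String × String)) (index : Int) (k : Nat) : List String :=
  (PySem.List.pyRange (index - k + 1) (index + 1) 1).map (pvP notes)
def pvWl (notes : List (String × String)) (index : Int) (k : Nat) : List String :=
  (PySem.List.pyRange (index - k + 1) (index + 1) 1).map (pvL notes)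

-- A's inner append-loop is a map
theorem pv_foldl_app (notes : List (String × String)) (l : List Int) (xs ys : List String) :
    l.foldl (fun (st : List String × List String) i =>
        let note := (PySem.List.pyGet? notes i).getD ("", "")
        (st.1 ++ [note.1], st.2 ++ ["L" ++ note.2])) (xs, ys)
      = (xs ++ l.map (pvP notes), ys ++ l.map (pvL notes)) := by
  induction l generalizing xs ys with
  | nil => simp
  | cons a t ih => simp [ih, pvP, pvL]

theorem pvWp_succ (notes : List (String × String)) (index : Int) (k : Nat) :
    pvWp notes index (k + 1) = pvP notes (index - k) :: pvWp notes index k := by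
  unfold pvWp
  rw [show index - ((k : Nat) + 1 : Nat) + 1 = index - k by push_cast; ring,
      PySem.List.pyRange_one_cons (by omega)]
  simp

theorem pvWl_succ (notes : List (String × String)) (index : Int) (k : Nat) :
    pvWl notes index (k + 1) = pvL notes (index - k) :: pvWl notes index k := by
  unfold pvWl
  rw [show index - ((k : Nat) + 1 : Nat) + 1 = index - k by push_cast; ring,
      PySem.List.pyRange_one_cons (by omega)]
  simp

-- the two folds in lockstep over range(k)
theorem pv_main (notes : List (String × String)) (index : Int) (k : Nat)
    (hk : (k : Int) ≤ index + 1) :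
    (PySem.List.pyRange 0 (k : Int) 1).foldl
        (fun (st : List (List String) × List String × List String) step =>
          let note := (PySem.List.pyGet? notes (index - step)).getD ("", "")
          let pitches := note.1 :: st.2.1
          let lengths := ("L" ++ note.2) :: st.2.2
          (PySem.Set.add (PySem.Set.add st.1 pitches) lengths, pitches, lengths))
        (PySem.Set.empty, [], [])
      = ((PySem.List.pyRange 0 (k : Int) 1).foldl
          (fun patterns pattern_length =>
            let pl := (PySem.List.pyRange (max 0 (index - pattern_length)) (index + 1) 1).foldl
              (fun (st : List String × List String) i =>
                let note := (PySem.List.pyGet? notes i).getD ("", "")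
                (st.1 ++ [note.1], st.2 ++ ["L" ++ note.2]))
              ([], [])
            PySem.Set.add (PySem.Set.add patterns pl.1) pl.2)
          PySem.Set.empty,
        pvWp notes index k, pvWl notes index k) := by
  induction k with
  | zero =>
      simp [PySem.List.pyRange_one_eq_nil (le_refl (0 : Int)), pvWp, pvWl,
            PySem.List.pyRange_one_eq_nil (le_refl (index + 1))]
  | succ k ih =>
      have hk' : (k : Int) ≤ index + 1 := by push_cast at hk ⊢; omega
      have hsplit : PySem.List.pyRange 0 ((k : Nat) + 1 : Nat) 1
          = PySem.List.pyRange 0 (k : Int) 1 ++ [(k : Int)] := by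
        push_cast
        exact PySem.List.pyRange_one_succ_right (by positivity)
      rw [hsplit, List.foldl_append, List.foldl_append, ih hk']
      have hmax : max 0 (index - (k : Int)) = index - k := by omega
      simp only [pv_foldl_app, List.nil_append]
      have e1 : pvWp notes index (k + 1)
          = (PySem.List.pyRange (index - (k : Int)) (index + 1) 1).map (pvP notes) := by
        unfold pvWp
        rw [show index - ((k : Nat) + 1 : Nat) + 1 = index - k by push_cast; ring]
      have e2 : pvWl notes index (k + 1)
          = (PySem.List.pyRange (index - (k : Int)) (index + 1) 1).map (pvL notes) := by
        unfold pvWl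
        rw [show index - ((k : Nat) + 1 : Nat) + 1 = index - k by push_cast; ring]
      simp only [List.foldl_cons, List.foldl_nil]
      rw [hmax, ← e1, ← e2, pvWp_succ, pvWl_succ]
      simp [pvP, pvL]

-- ===== VERDICT (by name: the statement is the Claim_ definition above) =====
theorem get_patterns_spec : Claim_equal_get_patterns := by
  intro notes index max_length _ _
  unfold Spec_get_patterns get_patterns get_patterns_alt
  by_cases h : min max_length (index + 1) ≤ 0
  · rw [PySem.List.pyRange_one_eq_nil (by omega)]
    simp
  · rw [not_le] at h
    have hM : min max_length (index + 1) = ((min max_length (index + 1)).toNat : Int) := by omega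
    rw [hM]
    rw [pv_main notes index (min max_length (index + 1)).toNat (by omega)]
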